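-- pv_equiv track=rewrite | github.com/Kannan-SN/Agentic-AI | Day 1/assignment3/src/utils.py | parse_financial_statement_structure
-- ===== SOURCE A (Python) =====
-- from typing import Dict, Any, List, Union
--
-- def parse_financial_statement_structure(text: str) -> Dict[str, List[str]]:
--     """
--     Parse and categorize financial statement sections from OCR text
--
--     Args:
--         text: OCR extracted text from financial statements
--
--     Returns:
--         Dictionary with categorized financial statement sections
--     """
--
--     # Define section keywords
--     section_keywords = {
--         'income_statement': ['revenue', 'income', 'profit', 'loss', 'earnings', 'expenses', 'ebitda'],
--         'balance_sheet': ['assets', 'liabilities', 'equity', 'capital', 'reserves', 'cash', 'deposits'],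
--         'cash_flow': ['cash flow', 'operating activities', 'investing activities', 'financing activities'],
--         'ratios': ['ratio', 'percentage', 'return on', 'cost income', 'leverage', 'capital adequacy'],
--         'performance_metrics': ['eps', 'roe', 'roa', 'nim', 'efficiency', 'productivity']
--     }
--
--     # Split text into sentences/lines
--     lines = text.split('\n')
--     lines = [line.strip() for line in lines if line.strip()]
--
--     categorized_sections = {section: [] for section in section_keywords.keys()}
--     categorized_sections['other'] = []
--
--     for line in lines:
--         line_lower = line.lower()
--         categorized = False
--
--         for section, keywords in section_keywords.items():
--             if any(keyword in line_lower for keyword in keywords):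
--                 categorized_sections[section].append(line)
--                 categorized = True
--                 break
--
--         if not categorized:
--             categorized_sections['other'].append(line)
--
--     return categorized_sections
-- ===== SOURCE B (Python) =====
-- def parse_financial_statement_structure(text: str):
--     """Flat keyword table + per-category grouping instead of a nested per-line category scan."""
--     section_keywords = {
--         'income_statement': ['revenue', 'income', 'profit', 'loss', 'earnings', 'expenses', 'ebitda'],
--         'balance_sheet': ['assets', 'liabilities', 'equity', 'capital', 'reserves', 'cash', 'deposits'],
--         'cash_flow': ['cash flow', 'operating activities', 'investing activities', 'financing activities'],
--         'ratios': ['ratio', 'percentage', 'return on', 'cost income', 'leverage', 'capital adequacy'],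
--         'performance_metrics': ['eps', 'roe', 'roa', 'nim', 'efficiency', 'productivity']
--     }
--     # one flat, priority-ordered (section, keyword) table
--     table = [(sec, kw) for sec, kws in section_keywords.items() for kw in kws]
--
--     def classify(line):
--         low = line.lower()
--         for sec, kw in table:
--             if kw in low:
--                 return sec
--         return 'other'
--
--     lines = [l for l in (raw.strip() for raw in text.split('\n')) if l]
--     categories = list(section_keywords) + ['other']
--     return {c: [l for l in lines if classify(l) == c] for c in categories}
-- ===== Notes on version B (the rewrite author's own statement) =====
-- stated objective: alternative
-- what changed: Replaces the per-line nested category/keyword scan with mutable-dict appends by a flat priority-ordered (section, keyword) table used by a classify function, and builds the result as one per-category grouping comprehension over fully initialized category keys.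
import Mathlib
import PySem

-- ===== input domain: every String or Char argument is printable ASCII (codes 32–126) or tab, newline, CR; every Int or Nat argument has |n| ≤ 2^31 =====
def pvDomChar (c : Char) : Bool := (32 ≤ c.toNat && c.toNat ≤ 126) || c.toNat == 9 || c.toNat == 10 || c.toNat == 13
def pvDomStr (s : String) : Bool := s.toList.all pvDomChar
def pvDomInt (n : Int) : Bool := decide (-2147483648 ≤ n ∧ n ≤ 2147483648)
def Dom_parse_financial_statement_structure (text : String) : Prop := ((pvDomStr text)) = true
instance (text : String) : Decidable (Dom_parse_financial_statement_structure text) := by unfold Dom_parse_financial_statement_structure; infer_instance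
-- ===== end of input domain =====

-- B replaces A's per-line nested category scan with mutable-dict appends by a flat
-- priority-ordered (section, keyword) table and a per-category grouping pass (objective: alternative).

-- ===== PORT A =====
-- A's inner 'for section, keywords in …: if any(…): append; break' loop, with the trailing
-- 'if not categorized' fallback folded into the base case of the recursion over the sections.
def pvALoop (line : String) (lw : String) (d : PySem.Dict String (List String)) :
    List (String × List String) → PySem.Dict String (List String)
  | [] => d.modify "other" [] (· ++ [line])
  | (s, kws) :: rest =>
    if kws.any (fun kw => PySem.Str.isIn kw lw) then d.modify s [] (· ++ [line])
    else pvALoop line lw d rest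

def parse_financial_statement_structure (text : String) : List (String × List String) :=
  let sectionKeywords : List (String × List String) :=
    [("income_statement", ["revenue", "income", "profit", "loss", "earnings", "expenses", "ebitda"]),
     ("balance_sheet", ["assets", "liabilities", "equity", "capital", "reserves", "cash", "deposits"]),
     ("cash_flow", ["cash flow", "operating activities", "investing activities", "financing activities"]),
     ("ratios", ["ratio", "percentage", "return on", "cost income", "leverage", "capital adequacy"]),
     ("performance_metrics", ["eps", "roe", "roa", "nim", "efficiency", "productivity"])]
  -- text.split('\n'); the separator is a nonempty literal, so split? never returns none
  let lines0 : List String := (PySem.Str.split? text "\n").getD []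
  let lines : List String :=
    (lines0.filter (fun line => PySem.Str.strip line != "")).map PySem.Str.strip
  let d0 : PySem.Dict String (List String) :=
    (sectionKeywords.foldl (fun d p => d.insert p.1 []) PySem.Dict.empty).insert "other" []
  (lines.foldl (fun d line => pvALoop line (PySem.Str.lower line) d sectionKeywords) d0).items

-- ===== PORT B =====
-- Source B's nested 'classify': first flat-table pair whose keyword occurs in the lowered line.
def pvBClassify (table : List (String × String)) (line : String) : String :=
  match table.find? (fun q => PySem.Str.isIn q.2 (PySem.Str.lower line)) with
  | some q => q.1
  | none => "other"

def parse_financial_statement_structure_alt (text : String) : List (String × List String) :=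
  let sectionKeywords : List (String × List String) :=
    [("income_statement", ["revenue", "income", "profit", "loss", "earnings", "expenses", "ebitda"]),
     ("balance_sheet", ["assets", "liabilities", "equity", "capital", "reserves", "cash", "deposits"]),
     ("cash_flow", ["cash flow", "operating activities", "investing activities", "financing activities"]),
     ("ratios", ["ratio", "percentage", "return on", "cost income", "leverage", "capital adequacy"]),
     ("performance_metrics", ["eps", "roe", "roa", "nim", "efficiency", "productivity"])]
  let table : List (String × String) :=
    sectionKeywords.flatMap (fun p => p.2.map (fun kw => (p.1, kw)))
  let lines : List String :=
    (((PySem.Str.split? text "\n").getD []).map PySem.Str.strip).filter (fun l => l != "")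
  let categories : List String := sectionKeywords.map (·.1) ++ ["other"]
  categories.map (fun c => (c, lines.filter (fun l => pvBClassify table l == c)))

-- ===== PRECONDITION & SPEC =====
def Spec_parse_financial_statement_structure (text : String) (out : List (String × List String)) : Prop := out = parse_financial_statement_structure_alt text
instance (text : String) (out : List (String × List String)) : Decidable (Spec_parse_financial_statement_structure text out) := by unfold Spec_parse_financial_statement_structure; infer_instance

-- ===== CLAIM (what is proved, stated in full; the proofs are below) =====
def Claim_equal_parse_financial_statement_structure : Prop := ∀ (text : String), Dom_parse_financial_statement_structure text → Spec_parse_financial_statement_structure text (parse_financial_statement_structure text)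

-- ===== LEMMAS AND PROOFS =====

-- the category a line lands in: first section one of whose keywords occurs in the lowered line
def pvKey (secs : List (String × List String)) (lw : String) : String :=
  match secs.find? (fun p => p.2.any (fun kw => PySem.Str.isIn kw lw)) with
  | some p => p.1
  | none => "other"

theorem pvALoop_eq (line lw : String) (d : PySem.Dict String (List String))
    (secs : List (String × List String)) :
    pvALoop line lw d secs = d.modify (pvKey secs lw) [] (· ++ [line]) := by
  induction secs with
  | nil => rfl
  | cons p rest ih =>
    obtain ⟨s, kws⟩ := p
    cases h : kws.any (fun kw => PySem.Str.isIn kw lw) with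
    | true => simp only [pvALoop, pvKey, List.find?_cons, h, if_true]
    | false => simp only [pvALoop, pvKey, List.find?_cons, h, Bool.false_eq_true, if_false, ih]

theorem pvBClassify_eq (secs : List (String × List String)) (line : String) :
    pvBClassify (secs.flatMap (fun p => p.2.map (fun kw => (p.1, kw)))) line
      = pvKey secs (PySem.Str.lower line) := by
  unfold pvBClassify pvKey
  induction secs with
  | nil => rfl
  | cons p rest ih =>
    obtain ⟨s, kws⟩ := p
    simp only [List.flatMap_cons, List.find?_append, List.find?_map, List.find?_cons,
      Function.comp_def]
    cases hf : kws.find? (fun kw => PySem.Str.isIn kw (PySem.Str.lower line)) with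
    | some k =>
      have hpk := List.find?_some hf
      have hany : kws.any (fun kw => PySem.Str.isIn kw (PySem.Str.lower line)) = true :=
        List.any_eq_true.mpr ⟨k, List.mem_of_find?_eq_some hf, hpk⟩
      simp only [hany, Option.map_some, Option.or]
    | none =>
      have hany : kws.any (fun kw => PySem.Str.isIn kw (PySem.Str.lower line)) = false := by
        rw [List.any_eq_false]
        exact fun kw hkw => by simpa using List.find?_eq_none.mp hf kw hkw
      simpa only [hany, hf, Option.map_none, Option.or, Bool.false_eq_true] using ih

theorem pvKey_mem (secs : List (String × List String)) (lw : String) :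
    pvKey secs lw ∈ secs.map (·.1) ++ ["other"] := by
  unfold pvKey
  cases h : secs.find? (fun p => p.2.any (fun kw => PySem.Str.isIn kw lw)) with
  | none => simp
  | some p =>
    have := List.mem_of_find?_eq_some h
    simp only [List.mem_append, List.mem_map]
    exact Or.inl ⟨p, this, rfl⟩

theorem pvSet_update_of_subset (s xs : List String) (h : ∀ x ∈ xs, x ∈ s) :
    PySem.Set.update s xs = s := by
  induction xs generalizing s with
  | nil => rfl
  | cons x rest ih =>
    have hstep : PySem.Set.update s (x :: rest) = PySem.Set.update (PySem.Set.add s x) rest := rfl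
    rw [hstep, PySem.Set.add_of_mem (h x (by simp))]
    exact ih s (fun y hy => h y (by simp [hy]))

theorem pvMaster (S : List (String × List String)) (L : List String)
    (d0 : PySem.Dict String (List String))
    (hnd : d0.keys.Nodup)
    (hkeys : d0.keys = S.map (·.1) ++ ["other"])
    (hgetD : ∀ c, d0.getD c [] = []) :
    (L.foldl (fun d line => d.modify (pvKey S (PySem.Str.lower line)) [] (· ++ [line])) d0).items
      = (S.map (·.1) ++ ["other"]).map
          (fun c => (c, L.filter (fun l => pvKey S (PySem.Str.lower l) == c))) := by
  have hfold :
      (L.foldl (fun d line => d.modify (pvKey S (PySem.Str.lower line)) [] (· ++ [line])) d0)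
        = ((L.map (fun l => (pvKey S (PySem.Str.lower l), l))).foldl
            (fun d p => d.modify p.1 [] (· ++ [p.2])) d0) := by
    rw [List.foldl_map]
  have hnd' : (L.foldl (fun d line =>
      d.modify (pvKey S (PySem.Str.lower line)) [] (· ++ [line])) d0).keys.Nodup :=
    PySem.Dict.nodup_keys_foldl_modify_key L (fun line => pvKey S (PySem.Str.lower line)) []
      (fun _ line => (· ++ [line])) d0 hnd
  have hk : (L.foldl (fun d line =>
      d.modify (pvKey S (PySem.Str.lower line)) [] (· ++ [line])) d0).keys = d0.keys := by
    rw [PySem.Dict.keys_foldl_modify_key L (fun line => pvKey S (PySem.Str.lower line)) []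
      (fun _ line => (· ++ [line])) d0]
    apply pvSet_update_of_subset
    intro x hx
    rw [List.mem_map] at hx
    obtain ⟨l, _, rfl⟩ := hx
    rw [hkeys]
    exact pvKey_mem S (PySem.Str.lower l)
  rw [PySem.Dict.items_eq_map_keys _ hnd' [], hk, hkeys]
  apply List.map_congr_left
  intro c _
  refine Prod.ext rfl ?_
  show (L.foldl (fun d line =>
      d.modify (pvKey S (PySem.Str.lower line)) [] (· ++ [line])) d0).getD c []
    = L.filter (fun l => pvKey S (PySem.Str.lower l) == c)
  rw [hfold, PySem.Dict.getD_foldl_modify_append, hgetD c, List.nil_append,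
    List.filter_map, List.map_map]
  simp [Function.comp_def]

-- ===== VERDICT (by name: the statement is the Claim_ definition above) =====
theorem parse_financial_statement_structure_spec : Claim_equal_parse_financial_statement_structure := by
  intro text _
  unfold Spec_parse_financial_statement_structure
  have hlines : ∀ raw : List String,
      List.filter (fun l => l != "") (List.map PySem.Str.strip raw)
        = List.map PySem.Str.strip (List.filter (fun line => PySem.Str.strip line != "") raw) := by
    intro raw; rw [List.filter_map]; rfl
  simp only [parse_financial_statement_structure, parse_financial_statement_structure_alt,
    pvBClassify_eq, pvALoop_eq, hlines]
  refine pvMaster _ _ _ ?_ ?_ ?_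
  · decide
  · decide
  · intro c
    simp only [List.foldl, PySem.Dict.getD_insert, PySem.Dict.getD_empty]
    split_ifs <;> rfl
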